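-- pv_equiv track=rewrite | github.com/igorsterner/TongueSwitcher | src/tongueswitcher/sentence_level_processor.py | first_smoothen
-- ===== SOURCE A (Python) =====
-- def first_smoothen(annotated_words):
--
--
--     for i in range(len(annotated_words)):
--
--         if annotated_words[i]["lan"] != 'U':
--             continue
--         elif i == 0 or i == len(annotated_words) - 1:
--             continue
--         if annotated_words[i-1]["lan"] == annotated_words[i+1]["lan"]:
--             annotated_words[i]["lan"] = annotated_words[i-1]["lan"]
--
--     return annotated_words
-- ===== SOURCE B (Python) =====
-- def first_smoothen(annotated_words):
--     # Project out the label sequence, rebuild it functionally with a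
--     # sliding window of three (zip of shifted views) over the ORIGINAL
--     # labels, then write the whole sequence back.  Correct because A's
--     # in-place writes never change a value that any later read depends on.
--     lans = [d["lan"] for d in annotated_words]
--     if len(lans) >= 2:
--         mid = [a if c == 'U' and a == b else c
--                for a, c, b in zip(lans, lans[1:], lans[2:])]
--         lans = lans[:1] + mid + lans[-1:]
--     for d, v in zip(annotated_words, lans):
--         d["lan"] = v
--     return annotated_words
-- ===== Notes on version B (the rewrite author's own statement) =====
-- stated objective: alternative
-- what changed: B projects out the label sequence, rebuilds it as a pure sequence via a triple-zip sliding window over the original labels (no indices, no reads of mutated state), and writes the whole sequence back, instead of A's indexed scan that reads and writes the live list; equivalent because A's writes never alter a value any later read depends on.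
import Mathlib
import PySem

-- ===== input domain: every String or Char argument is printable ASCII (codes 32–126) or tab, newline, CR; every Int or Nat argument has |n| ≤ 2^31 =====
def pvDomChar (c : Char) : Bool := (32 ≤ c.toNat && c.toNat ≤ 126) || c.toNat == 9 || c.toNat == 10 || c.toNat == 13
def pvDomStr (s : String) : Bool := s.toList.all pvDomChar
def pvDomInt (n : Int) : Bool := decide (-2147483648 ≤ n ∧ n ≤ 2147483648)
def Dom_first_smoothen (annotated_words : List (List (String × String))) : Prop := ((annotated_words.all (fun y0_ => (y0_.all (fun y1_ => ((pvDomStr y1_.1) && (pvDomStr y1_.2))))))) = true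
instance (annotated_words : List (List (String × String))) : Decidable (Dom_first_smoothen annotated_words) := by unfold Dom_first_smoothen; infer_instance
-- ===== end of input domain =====

-- B projects out the label sequence, rebuilds it functionally with a triple-zip sliding window over the
-- ORIGINAL labels, and writes the whole sequence back, instead of A's indexed scan that reads and writes the
-- live list (same cost). Both Pythons mutate the argument in place and return it; the equivalence proved here
-- is about the returned value.

-- ===== PORT A =====
-- d["lan"]: first matching key of the association list (none = KeyError)
def lanGet (d : List (String × String)) : Option String :=
  match d with
  | [] => none
  | (k, v) :: rest => if k = "lan" then some v else lanGet rest

-- d["lan"] = v: overwrite the first occurrence in place (append if absent)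
def lanSet (d : List (String × String)) (v : String) : List (String × String) :=
  match d with
  | [] => [("lan", v)]
  | (k, w) :: rest => if k = "lan" then (k, v) :: rest else (k, w) :: lanSet rest v

-- one iteration of A's loop body at index i, over the current (possibly already written) list acc
def stepA (acc : List (List (String × String))) (i : Int) : List (List (String × String)) :=
  match PySem.List.pyGet? acc i with
  | none => acc
  | some d =>
    match lanGet d with
    | none => acc   -- KeyError: outside Pre_
    | some lan =>
      if lan ≠ "U" then acc
      else if i = 0 ∨ i = (acc.length : Int) - 1 then acc
      else
        match (PySem.List.pyGet? acc (i - 1)).bind lanGet, (PySem.List.pyGet? acc (i + 1)).bind lanGet with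
        | some ll, some rl =>
            if ll = rl then PySem.List.pySetD acc i (lanSet d ll) else acc
        | _, _ => acc

def first_smoothen (annotated_words : List (List (String × String))) : List (List (String × String)) :=
  (PySem.List.pyRange 0 (annotated_words.length : Int) 1).foldl stepA annotated_words

-- ===== PORT B =====
-- the windowed comprehension body: 'a if c == "U" and a == b else c' (labels threaded as Option; none = missing key, outside Pre_)
def winStep (a c b : Option String) : Option String := if c = some "U" ∧ a = b then a else c

-- zip(lans, lans[1:], lans[2:]) consumed by the comprehension
def zip3win : List (Option String) → List (Option String) → List (Option String) → List (Option String)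
  | a :: t1, c :: t2, b :: t3 => winStep a c b :: zip3win t1 t2 t3
  | _, _, _ => []

def first_smoothen_alt (annotated_words : List (List (String × String))) : List (List (String × String)) :=
  let lans := annotated_words.map lanGet
  let lans' :=
    if 2 ≤ lans.length then
      PySem.List.slice lans none (some 1) ++
        zip3win lans (PySem.List.slice lans (some 1) none) (PySem.List.slice lans (some 2) none) ++
        PySem.List.slice lans (some (-1)) none
    else lans
  (annotated_words.zip lans').map (fun p => match p.2 with | some v => lanSet p.1 v | none => p.1)

-- ===== PRECONDITION & SPEC =====
-- Pre_ excludes exactly the inputs where the Python raises KeyError: some element lacks the "lan" key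
-- (both programs read every element's "lan", so both raise exactly there).
def Pre_first_smoothen (annotated_words : List (List (String × String))) : Prop :=
  ∀ d ∈ annotated_words, (lanGet d).isSome = true
instance (annotated_words : List (List (String × String))) : Decidable (Pre_first_smoothen annotated_words) := by unfold Pre_first_smoothen; infer_instance

def pvWitness_first_smoothen : (List (List (String × String))) :=
  [[("lan", "D")], [("lan", "U")], [("lan", "D")]]

def Spec_first_smoothen (annotated_words : List (List (String × String))) (out : List (List (String × String))) : Prop := out = first_smoothen_alt annotated_words
instance (annotated_words : List (List (String × String))) (out : List (List (String × String))) : Decidable (Spec_first_smoothen annotated_words out) := by unfold Spec_first_smoothen; infer_instance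

-- ===== CLAIM (what is proved, stated in full; the proofs are below) =====
def Claim_equal_first_smoothen : Prop := ∀ (annotated_words : List (List (String × String))), Dom_first_smoothen annotated_words → Pre_first_smoothen annotated_words → Spec_first_smoothen annotated_words (first_smoothen annotated_words)

-- ===== LEMMAS AND PROOFS =====

-- the original label of element j (read on the untouched input)
def Lj (aw : List (List (String × String))) (j : Nat) : Option String := aw[j]?.bind lanGet

-- the value (if any) written at index j, computed from the original labels only
def upd (aw : List (List (String × String))) (j : Nat) : Option String :=
  if 0 < j ∧ j + 1 < aw.length then
    match Lj aw j, Lj aw (j - 1), Lj aw (j + 1) with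
    | some lan, some a, some b => if lan = "U" ∧ a = b then some a else none
    | _, _, _ => none
  else none

-- the final label at index j (original labels, or the smoothing update where it fires)
def newL (aw : List (List (String × String))) (j : Nat) : Option String :=
  match upd aw j with
  | some v => some v
  | none => Lj aw j

-- the list after the writes at all indices < m
def applyUpTo (aw : List (List (String × String))) (m : Nat) : List (List (String × String)) :=
  aw.mapIdx (fun j d => if j < m then (match upd aw j with | some v => lanSet d v | none => d) else d)

theorem lanGet_lanSet (d : List (String × String)) (v w : String) (h : lanGet d = some w) :
    lanGet (lanSet d v) = some v := by
  induction d with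
  | nil => simp [lanGet] at h
  | cons p rest ih =>
    obtain ⟨k, w'⟩ := p
    by_cases hk : k = "lan" <;> simp [lanGet, lanSet, hk] at h ⊢
    exact ih h

theorem lanSet_self (d : List (String × String)) (v : String) (h : lanGet d = some v) :
    lanSet d v = d := by
  induction d with
  | nil => simp [lanGet] at h
  | cons p rest ih =>
    obtain ⟨k, w⟩ := p
    by_cases hk : k = "lan" <;> simp [lanGet, lanSet, hk] at h ⊢
    · exact h.symm
    · exact ih h

theorem length_applyUpTo (aw : List (List (String × String))) (m : Nat) :
    (applyUpTo aw m).length = aw.length := by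
  simp [applyUpTo]

theorem getElem?_applyUpTo (aw : List (List (String × String))) (m j : Nat) :
    (applyUpTo aw m)[j]? = aw[j]?.map (fun d => if j < m then (match upd aw j with | some v => lanSet d v | none => d) else d) := by
  simp [applyUpTo, List.getElem?_mapIdx]

theorem upd_bound (aw : List (List (String × String))) (j : Nat) (h : ¬ (0 < j ∧ j + 1 < aw.length)) :
    upd aw j = none := by
  simp [upd, h]

theorem applyUpTo_succ_none (aw : List (List (String × String))) (m : Nat) (h : upd aw m = none) :
    applyUpTo aw (m + 1) = applyUpTo aw m := by
  apply List.ext_getElem?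
  intro j
  rw [getElem?_applyUpTo, getElem?_applyUpTo]
  cases hj : aw[j]? with
  | none => rfl
  | some d =>
    by_cases h1 : j < m
    · simp [h1, Nat.lt_succ_of_lt h1]
    · by_cases h2 : j < m + 1
      · have hjm : j = m := by omega
        subst hjm
        simp [h1, h2, h]
      · simp [h1, h2]

theorem applyUpTo_succ_some (aw : List (List (String × String))) (m : Nat) (v : String)
    (hm : m < aw.length) (h : upd aw m = some v) :
    applyUpTo aw (m + 1) = (applyUpTo aw m).set m (lanSet (aw[m]'hm) v) := by
  apply List.ext_getElem?
  intro j
  rw [List.getElem?_set, getElem?_applyUpTo, getElem?_applyUpTo]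
  by_cases hjm : m = j
  · subst hjm
    simp [length_applyUpTo, hm, List.getElem?_eq_getElem hm, h]
  · by_cases h1 : j < m
    · simp [hjm, h1, Nat.lt_succ_of_lt h1]
    · have h2 : ¬ j < m + 1 := by omega
      simp [hjm, h1, h2]

theorem upd_some (aw : List (List (String × String))) (j : Nat) (v : String) (h : upd aw j = some v) :
    0 < j ∧ j + 1 < aw.length ∧ Lj aw j = some "U" ∧ Lj aw (j - 1) = some v ∧ Lj aw (j + 1) = some v := by
  unfold upd at h
  split at h
  case isFalse => simp at h
  case isTrue hb =>
    cases h1 : Lj aw j with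
    | none => rw [h1] at h; simp at h
    | some lan =>
      cases h2 : Lj aw (j - 1) with
      | none => rw [h1, h2] at h; simp at h
      | some a =>
        cases h3 : Lj aw (j + 1) with
        | none => rw [h1, h2, h3] at h; simp at h
        | some b =>
          rw [h1, h2, h3] at h
          simp only [Option.some.injEq] at h
          split at h
          case isTrue hc =>
            cases h
            obtain ⟨rfl, rfl⟩ := hc
            exact ⟨hb.1, hb.2, rfl, rfl, rfl⟩
          case isFalse hc => cases h

theorem Lj_applyUpTo (aw : List (List (String × String))) (m j : Nat) :
    Lj (applyUpTo aw m) j =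
      if j < m then (match upd aw j with | some v => some v | none => Lj aw j) else Lj aw j := by
  unfold Lj
  rw [getElem?_applyUpTo]
  cases hj : aw[j]? with
  | none =>
    have hge : aw.length ≤ j := by simpa using List.getElem?_eq_none_iff.mp hj
    have hu : upd aw j = none := upd_bound _ _ (by omega)
    simp [hu, Lj, hj]
  | some d =>
    simp only [Option.map_some, Option.bind_some]
    by_cases h1 : j < m
    · simp only [if_pos h1]
      cases hupd : upd aw j with
      | none => simp [Lj, hj]
      | some v =>
        obtain ⟨_, _, hLj, _, _⟩ := upd_some aw j v hupd
        unfold Lj at hLj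
        rw [hj] at hLj
        simp only [Option.bind_some] at hLj
        simp [lanGet_lanSet d v _ hLj]
    · simp [h1, Lj, hj]

theorem getElem?_applyUpTo_ge (aw : List (List (String × String))) (m j : Nat) (h : m ≤ j) :
    (applyUpTo aw m)[j]? = aw[j]? := by
  rw [getElem?_applyUpTo]
  have h1 : ¬ j < m := by omega
  cases hj : aw[j]? <;> simp [h1]

theorem stepA_applyUpTo (aw : List (List (String × String))) (m : Nat) :
    stepA (applyUpTo aw m) (m : Int) = applyUpTo aw (m + 1) := by
  have hlen : (applyUpTo aw m).length = aw.length := length_applyUpTo aw m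
  unfold stepA
  rw [PySem.List.pyGet?_natCast, getElem?_applyUpTo_ge aw m m le_rfl]
  cases hj : aw[m]? with
  | none =>
    have hge : aw.length ≤ m := by simpa using List.getElem?_eq_none_iff.mp hj
    rw [applyUpTo_succ_none aw m (upd_bound _ _ (by omega))]
  | some d =>
    have hm : m < aw.length := by
      by_contra hc
      rw [List.getElem?_eq_none_iff.mpr (by omega)] at hj
      cases hj
    dsimp only
    cases hl : lanGet d with
    | none =>
      have hu : upd aw m = none := by
        unfold upd
        split
        · have hL0 : Lj aw m = none := by unfold Lj; rw [hj]; simp [hl]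
          rw [hL0]
        · rfl
      dsimp only
      rw [applyUpTo_succ_none aw m hu]
    | some lan =>
      dsimp only
      have hLU : Lj aw m = some lan := by unfold Lj; rw [hj]; simp [hl]
      by_cases hU : lan = "U"
      case neg =>
        rw [if_pos hU]
        have hu : upd aw m = none := by
          unfold upd
          split
          · rw [hLU]
            cases Lj aw (m - 1) <;> cases Lj aw (m + 1) <;> simp [hU]
          · rfl
        rw [applyUpTo_succ_none aw m hu]
      case pos =>
        subst hU
        rw [if_neg (by simp)]
        rw [hlen]
        by_cases hb : m = 0 ∨ m + 1 = aw.length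
        · rw [if_pos (by rcases hb with hb | hb <;> [left; right] <;> omega)]
          rw [applyUpTo_succ_none aw m (upd_bound _ _ (by omega))]
        · rw [if_neg (by push_neg; constructor <;> omega)]
          have hi0 : 0 < m := by omega
          have hi1 : m + 1 < aw.length := by omega
          rw [show (m : Int) - 1 = ((m - 1 : Nat) : Int) by omega,
              show (m : Int) + 1 = ((m + 1 : Nat) : Int) by omega,
              PySem.List.pyGet?_natCast, PySem.List.pyGet?_natCast]
          have hL : ((applyUpTo aw m)[m - 1]?).bind lanGet = Lj aw (m - 1) := by
            show Lj (applyUpTo aw m) (m - 1) = Lj aw (m - 1)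
            rw [Lj_applyUpTo]
            rw [if_pos (by omega)]
            cases hupd : upd aw (m - 1) with
            | none => rfl
            | some v =>
              obtain ⟨_, _, hL1, _, hL3⟩ := upd_some aw (m - 1) v hupd
              rw [show m - 1 + 1 = m by omega] at hL3
              rw [hL3] at hLU
              cases hLU
              exact hL1.symm
          have hR : ((applyUpTo aw m)[m + 1]?).bind lanGet = Lj aw (m + 1) := by
            show Lj (applyUpTo aw m) (m + 1) = Lj aw (m + 1)
            rw [Lj_applyUpTo]
            rw [if_neg (by omega)]
          rw [hL, hR]
          cases h2 : Lj aw (m - 1) with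
          | none =>
            have hu : upd aw m = none := by
              unfold upd
              rw [if_pos ⟨hi0, hi1⟩, hLU, h2]
            rw [applyUpTo_succ_none aw m hu]
          | some ll =>
            cases h3 : Lj aw (m + 1) with
            | none =>
              have hu : upd aw m = none := by
                unfold upd
                rw [if_pos ⟨hi0, hi1⟩, hLU, h2, h3]
              rw [applyUpTo_succ_none aw m hu]
            | some rl =>
              dsimp only
              by_cases heq : ll = rl
              · subst heq
                rw [if_pos rfl, PySem.List.pySetD_natCast]
                have hu : upd aw m = some ll := by
                  unfold upd
                  rw [if_pos ⟨hi0, hi1⟩, hLU, h2, h3]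
                  simp
                have hd : aw[m]'hm = d := by
                  rw [List.getElem?_eq_getElem hm] at hj
                  exact Option.some.inj hj
                rw [applyUpTo_succ_some aw m ll hm hu, hd]
              · rw [if_neg heq]
                have hu : upd aw m = none := by
                  unfold upd
                  rw [if_pos ⟨hi0, hi1⟩, hLU, h2, h3]
                  simp [heq]
                rw [applyUpTo_succ_none aw m hu]

theorem applyUpTo_zero (aw : List (List (String × String))) : applyUpTo aw 0 = aw := by
  apply List.ext_getElem?
  intro j
  rw [getElem?_applyUpTo]
  cases aw[j]? <;> simp

theorem foldA_eq (aw : List (List (String × String))) (m : Nat) :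
    (List.range m).foldl (fun acc (k : Nat) => stepA acc (k : Int)) aw = applyUpTo aw m := by
  induction m with
  | zero => simp [applyUpTo_zero]
  | succ m ih =>
    rw [List.range_succ, List.foldl_append, ih]
    simp [stepA_applyUpTo]

theorem first_smoothen_eq (aw : List (List (String × String))) :
    first_smoothen aw = applyUpTo aw aw.length := by
  unfold first_smoothen
  rw [PySem.List.pyRange_one, List.foldl_map]
  have : ((aw.length : Int) - 0).toNat = aw.length := by omega
  rw [this]
  simpa using foldA_eq aw aw.length

-- ===== B-side lemmas =====

theorem getElem?_zip3win (l1 l2 l3 : List (Option String)) (i : Nat) :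
    (zip3win l1 l2 l3)[i]? =
      l1[i]?.bind (fun a => l2[i]?.bind (fun c => l3[i]?.map (fun b => winStep a c b))) := by
  induction l1 generalizing l2 l3 i with
  | nil => simp [zip3win]
  | cons a t1 ih =>
    cases l2 with
    | nil => simp [zip3win]
    | cons c t2 =>
      cases l3 with
      | nil => simp [zip3win]
      | cons b t3 =>
        cases i with
        | zero => simp [zip3win]
        | succ i => simpa [zip3win] using ih t2 t3 i

theorem length_zip3win (l1 l2 l3 : List (Option String)) :
    (zip3win l1 l2 l3).length = min l1.length (min l2.length l3.length) := by
  induction l1 generalizing l2 l3 with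
  | nil => simp [zip3win]
  | cons a t1 ih =>
    cases l2 with
    | nil => simp [zip3win]
    | cons c t2 =>
      cases l3 with
      | nil => simp [zip3win]
      | cons b t3 => simp [zip3win, ih]

theorem map_lanGet_getElem? (aw : List (List (String × String))) (j : Nat) (hj : j < aw.length) :
    (aw.map lanGet)[j]? = some (Lj aw j) := by
  rw [List.getElem?_map, List.getElem?_eq_getElem hj]
  simp [Lj, List.getElem?_eq_getElem hj]

-- the rebuilt label sequence, position by position
theorem lans'_getElem? (aw : List (List (String × String)))
    (hPre : ∀ d ∈ aw, (lanGet d).isSome = true) (h2 : 2 ≤ aw.length) (j : Nat) (hj : j < aw.length) :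
    (PySem.List.slice (aw.map lanGet) none (some 1) ++
      zip3win (aw.map lanGet) (PySem.List.slice (aw.map lanGet) (some 1) none)
        (PySem.List.slice (aw.map lanGet) (some 2) none) ++
      PySem.List.slice (aw.map lanGet) (some (-1)) none)[j]? = some (newL aw j) := by
  set lans := aw.map lanGet with hlans
  have hlen : lans.length = aw.length := by simp [hlans]
  have hs0 : PySem.List.slice lans none (some 1) = lans.take 1 := by
    rw [PySem.List.slice_to lans (b := 1) (by norm_num)]; rfl
  have hs1 : PySem.List.slice lans (some 1) none = lans.drop 1 := by
    rw [PySem.List.slice_from lans (a := 1) (by norm_num)]; rfl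
  have hs2 : PySem.List.slice lans (some 2) none = lans.drop 2 := by
    rw [PySem.List.slice_from lans (a := 2) (by norm_num)]; rfl
  rw [hs0, hs1, hs2, PySem.List.slice_from_neg_one]
  have hmidlen : (zip3win lans (lans.drop 1) (lans.drop 2)).length = aw.length - 2 := by
    rw [length_zip3win]
    simp [hlen]
    omega
  have htake1 : (lans.take 1).length = 1 := by simp [hlen]; omega
  by_cases hj0 : j = 0
  · subst hj0
    rw [List.getElem?_append_left (by rw [List.length_append, htake1]; omega),
        List.getElem?_append_left (by omega), List.getElem?_take_of_lt (by omega),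
        map_lanGet_getElem? aw 0 (by omega)]
    have : upd aw 0 = none := upd_bound _ _ (by omega)
    simp [newL, this]
  · by_cases hjlast : j = aw.length - 1
    · subst hjlast
      rw [List.getElem?_append_right (by rw [List.length_append, htake1, hmidlen]; omega)]
      rw [List.length_append, htake1, hmidlen, hlen]
      rw [show aw.length - 1 - (1 + (aw.length - 2)) = 0 by omega]
      rw [List.getElem?_drop, show aw.length - 1 + 0 = aw.length - 1 by omega,
          map_lanGet_getElem? aw (aw.length - 1) (by omega)]
      have : upd aw (aw.length - 1) = none := upd_bound _ _ (by omega)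
      simp [newL, this]
    · -- interior: 1 ≤ j ≤ length - 2
      have hji : 1 ≤ j ∧ j + 1 < aw.length := by omega
      rw [List.getElem?_append_left (by rw [List.length_append, htake1, hmidlen]; omega),
          List.getElem?_append_right (by rw [htake1]; omega)]
      rw [htake1, getElem?_zip3win]
      rw [List.getElem?_drop, List.getElem?_drop]
      rw [show j - 1 = j - 1 by rfl]
      rw [map_lanGet_getElem? aw (j - 1) (by omega),
          show 1 + (j - 1) = j by omega, map_lanGet_getElem? aw j (by omega),
          show 2 + (j - 1) = j + 1 by omega, map_lanGet_getElem? aw (j + 1) (by omega)]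
      simp only [Option.bind_some, Option.map_some]
      congr 1
      -- winStep on the three original labels equals newL at an interior index
      have hSj : (Lj aw j).isSome = true := by
        have := hPre (aw[j]'hj) (List.getElem_mem hj)
        simpa [Lj, List.getElem?_eq_getElem hj] using this
      have hSl : (Lj aw (j - 1)).isSome = true := by
        have hk : j - 1 < aw.length := by omega
        have := hPre (aw[j-1]'hk) (List.getElem_mem hk)
        simpa [Lj, List.getElem?_eq_getElem hk] using this
      have hSr : (Lj aw (j + 1)).isSome = true := by
        have hk : j + 1 < aw.length := by omega
        have := hPre (aw[j+1]'hk) (List.getElem_mem hk)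
        simpa [Lj, List.getElem?_eq_getElem hk] using this
      obtain ⟨c, hc⟩ := Option.isSome_iff_exists.mp hSj
      obtain ⟨a, ha⟩ := Option.isSome_iff_exists.mp hSl
      obtain ⟨b, hb⟩ := Option.isSome_iff_exists.mp hSr
      unfold winStep newL upd
      rw [if_pos (show 0 < j ∧ j + 1 < aw.length by omega), ha, hc, hb]
      by_cases hU : c = "U"
      · subst hU
        by_cases hab : a = b
        · subst hab
          simp
        · simp [hab]
      · simp [hU]

theorem newL_isSome (aw : List (List (String × String)))
    (hPre : ∀ d ∈ aw, (lanGet d).isSome = true) (j : Nat) (hj : j < aw.length) :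
    ∃ v, newL aw j = some v := by
  unfold newL
  cases hu : upd aw j with
  | some v => exact ⟨v, rfl⟩
  | none =>
    have := hPre (aw[j]'hj) (List.getElem_mem hj)
    obtain ⟨v, hv⟩ := Option.isSome_iff_exists.mp this
    exact ⟨v, by simp [Lj, List.getElem?_eq_getElem hj, hv]⟩

theorem first_smoothen_alt_eq (aw : List (List (String × String)))
    (hPre : ∀ d ∈ aw, (lanGet d).isSome = true) :
    first_smoothen_alt aw = applyUpTo aw aw.length := by
  unfold first_smoothen_alt
  simp only
  set lans := aw.map lanGet with hlans
  have hlen : lans.length = aw.length := by simp [hlans]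
  set lans' :=
    if 2 ≤ lans.length then
      PySem.List.slice lans none (some 1) ++
        zip3win lans (PySem.List.slice lans (some 1) none) (PySem.List.slice lans (some 2) none) ++
        PySem.List.slice lans (some (-1)) none
    else lans with hlans'
  have hget : ∀ j, j < aw.length → lans'[j]? = some (newL aw j) := by
    intro j hj
    rw [hlans']
    by_cases h2 : 2 ≤ lans.length
    · rw [if_pos h2]
      exact lans'_getElem? aw hPre (by omega) j hj
    · rw [if_neg h2, hlans, map_lanGet_getElem? aw j hj]
      have : upd aw j = none := upd_bound _ _ (by omega)
      simp [newL, this]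
  apply List.ext_getElem?
  intro j
  rw [getElem?_applyUpTo, List.getElem?_map, List.zip_eq_zipWith, List.getElem?_zipWith]
  by_cases hj : j < aw.length
  · rw [List.getElem?_eq_getElem hj, hget j hj]
    obtain ⟨v, hv⟩ := newL_isSome aw hPre j hj
    rw [hv]
    simp only [Option.map_some, Option.some.injEq, if_pos hj]
    unfold newL at hv
    cases hu : upd aw j with
    | some w =>
      rw [hu] at hv
      cases hv
      rfl
    | none =>
      rw [hu] at hv
      have hv' : lanGet (aw[j]'hj) = some v := by
        rw [Lj, List.getElem?_eq_getElem hj] at hv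
        simpa using hv
      simpa using lanSet_self _ v hv'
  · rw [List.getElem?_eq_none_iff.mpr (by omega)]
    simp

-- ===== VERDICT (by name: the statement is the Claim_ definition above) =====
theorem first_smoothen_spec : Claim_equal_first_smoothen := by
  intro aw _ hPre
  unfold Spec_first_smoothen
  rw [first_smoothen_eq, first_smoothen_alt_eq aw hPre]
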